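-- pv_equiv track=rewrite | github.com/NEU-SNS/ReverseTraceroutePublic | rankingservice/algorithms/ingress_cover.py | index_subpaths_biggest_common_suffix
-- ===== SOURCE A (Python) =====
-- def index_subpaths_biggest_common_suffix(rr_sub_paths):
--
--     '''
--     Modify the subpaths in place to remove their longest common suffix
--     :param rr_sub_paths: a list of tuple (rr_ip, hop)
--     :return:
--     '''
--     remove_index = 1
--     while True:
--         last_ips = set(x[1][0][-remove_index][0] for x in rr_sub_paths if len(x[1][0]) >= remove_index)
--         if len(last_ips) == 1:
--             remove_index += 1
--         else:
--             break
--     return remove_index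
-- ===== SOURCE B (Python) =====
-- def index_subpaths_biggest_common_suffix(rr_sub_paths):
--     # Fold each path's reversed ip list into one running (suffix, dead) pair:
--     # 'suffix' is the agreed common suffix so far, 'dead' records that two paths
--     # already disagree right after it. No per-column set scans.
--     suffix, dead = [], False
--     for x in rr_sub_paths:
--         ips = [hop[0] for hop in x[1][0]]
--         ips.reverse()
--         i = 0
--         n = min(len(suffix), len(ips))
--         while i < n and suffix[i] == ips[i]:
--             i += 1
--         if i < n:                 # genuine disagreement at column i
--             suffix, dead = suffix[:i], True
--         elif i == len(suffix) and not dead: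
--             suffix = ips          # suffix is a prefix of ips: extend
--         # otherwise ips is a prefix of suffix (or dead): unchanged
--     return len(suffix) + 1
-- ===== Notes on version B (the rewrite author's own statement) =====
-- stated objective: alternative
-- what changed: A scans suffix positions, rebuilding per position a set of each path's r-th-from-last element over the whole input; B makes one left fold over the paths, merging each path's reversed ip list into a single running (common-suffix, dead) accumulator via longest-common-prefix comparison, with no per-position set construction.
import Mathlib
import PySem

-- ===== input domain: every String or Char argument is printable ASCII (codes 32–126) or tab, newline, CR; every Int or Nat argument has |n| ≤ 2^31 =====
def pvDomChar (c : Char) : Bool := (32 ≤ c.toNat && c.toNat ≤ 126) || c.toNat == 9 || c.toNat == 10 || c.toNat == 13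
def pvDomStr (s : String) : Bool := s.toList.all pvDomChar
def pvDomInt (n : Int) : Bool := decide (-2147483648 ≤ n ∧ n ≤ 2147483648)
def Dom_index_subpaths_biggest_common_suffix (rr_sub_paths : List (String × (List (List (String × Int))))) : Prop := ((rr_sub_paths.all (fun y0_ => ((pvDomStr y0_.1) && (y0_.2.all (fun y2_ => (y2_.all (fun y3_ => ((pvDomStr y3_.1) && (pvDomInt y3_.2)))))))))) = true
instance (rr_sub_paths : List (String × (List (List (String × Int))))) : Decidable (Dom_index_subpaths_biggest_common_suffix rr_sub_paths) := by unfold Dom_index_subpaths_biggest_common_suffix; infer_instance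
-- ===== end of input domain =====

-- B replaces A's per-suffix-position set rebuilds by a single left fold that merges each path's
-- reversed ip list into one running (common-suffix, dead) accumulator (objective: alternative).


-- ===== PORT A =====
-- x[1][0] : raises IndexError when x[1] is empty (excluded by Pre_); port uses getD [] there
def pvFirst (x : String × (List (List (String × Int)))) : List (String × Int) :=
  (PySem.List.pyGet? x.2 0).getD []

-- set(x[1][0][-remove_index][0] for x in rr_sub_paths if len(x[1][0]) >= remove_index)
def pvLastIps (paths : List (String × (List (List (String × Int))))) (r : Nat) : PySem.Set String :=
  PySem.Set.ofList
    ((paths.filter (fun x => r ≤ (pvFirst x).length)).map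
      (fun x => ((PySem.List.pyGet? (pvFirst x) (-(r : Int))).getD ("", 0)).1))

-- the 'while True' loop of A; fuel only makes the recursion total (it never runs out: once
-- remove_index exceeds every path length the set is empty and the loop breaks)
def pvALoop (paths : List (String × (List (List (String × Int))))) (r fuel : Nat) : Int :=
  match fuel with
  | 0 => (r : Int)
  | fuel + 1 =>
      if (pvLastIps paths r).length = 1 then pvALoop paths (r + 1) fuel else (r : Int)

def index_subpaths_biggest_common_suffix (rr_sub_paths : List (String × (List (List (String × Int))))) : Int :=
  pvALoop rr_sub_paths 1 (rr_sub_paths.foldl (fun m x => max m (pvFirst x).length) 0 + 1)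

-- ===== PORT B =====
-- ips = [hop[0] for hop in x[1][0]]; ips.reverse()
def pvRev (x : String × (List (List (String × Int)))) : List String :=
  ((pvFirst x).map Prod.fst).reverse

-- the 'while i < n and suffix[i] == ips[i]: i += 1' loop: length of the common prefix
def pvCommonLen : List String → List String → Nat
  | a :: as, b :: bs => if a = b then pvCommonLen as bs + 1 else 0
  | _, _ => 0

-- one iteration of B's 'for x in rr_sub_paths' loop
def pvStep (acc : List String × Bool) (x : String × (List (List (String × Int)))) : List String × Bool :=
  let ips := pvRev x
  let i := pvCommonLen acc.1 ips
  if i < min acc.1.length ips.length then (acc.1.take i, true)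
  else if i = acc.1.length ∧ acc.2 = false then (ips, acc.2)
  else acc

def index_subpaths_biggest_common_suffix_alt (rr_sub_paths : List (String × (List (List (String × Int))))) : Int :=
  let r := rr_sub_paths.foldl pvStep ([], false)
  (r.1.length : Int) + 1

-- ===== PRECONDITION & SPEC =====
-- Pre_ excludes exactly the inputs where Python A raises IndexError: some x[1] is the empty list,
-- so x[1][0] fails.
def Pre_index_subpaths_biggest_common_suffix (rr_sub_paths : List (String × (List (List (String × Int))))) : Prop :=
  ∀ x ∈ rr_sub_paths, x.2 ≠ []
instance (rr_sub_paths : List (String × (List (List (String × Int))))) : Decidable (Pre_index_subpaths_biggest_common_suffix rr_sub_paths) := by unfold Pre_index_subpaths_biggest_common_suffix; infer_instance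
def pvWitness_index_subpaths_biggest_common_suffix : (List (String × (List (List (String × Int))))) :=
  [("s1", [[("10.0.0.1", 1), ("10.0.0.2", 2)]]), ("s2", [[("10.0.0.9", 1), ("10.0.0.2", 2)]])]
def Spec_index_subpaths_biggest_common_suffix (rr_sub_paths : List (String × (List (List (String × Int))))) (out : Int) : Prop := out = index_subpaths_biggest_common_suffix_alt rr_sub_paths
instance (rr_sub_paths : List (String × (List (List (String × Int))))) (out : Int) : Decidable (Spec_index_subpaths_biggest_common_suffix rr_sub_paths out) := by unfold Spec_index_subpaths_biggest_common_suffix; infer_instance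

-- ===== CLAIM (what is proved, stated in full; the proofs are below) =====
def Claim_equal_index_subpaths_biggest_common_suffix : Prop := ∀ (rr_sub_paths : List (String × (List (List (String × Int))))), Dom_index_subpaths_biggest_common_suffix rr_sub_paths → Pre_index_subpaths_biggest_common_suffix rr_sub_paths → Spec_index_subpaths_biggest_common_suffix rr_sub_paths (index_subpaths_biggest_common_suffix rr_sub_paths)

-- ===== LEMMAS AND PROOFS =====

-- the invariant B's fold maintains over the paths seen so far
def pvInv (seen : List (String × (List (List (String × Int))))) (P : List String) (c : Bool) : Prop :=
  (∀ x ∈ seen, ∀ i < P.length, i < (pvRev x).length → (pvRev x).getD i "" = P.getD i "") ∧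
  (P = [] ∨ ∃ x ∈ seen, P.length ≤ (pvRev x).length) ∧
  (c = true →
      ∃ x ∈ seen, ∃ y ∈ seen, P.length < (pvRev x).length ∧ P.length < (pvRev y).length ∧
        (pvRev x).getD P.length "" ≠ (pvRev y).getD P.length "") ∧
  (c = false → ∀ x ∈ seen, (pvRev x).length ≤ P.length)

theorem pvCommonLen_le (a b : List String) : pvCommonLen a b ≤ min a.length b.length := by
  induction a generalizing b with
  | nil => simp [pvCommonLen]
  | cons h t ih =>
    cases b with
    | nil => simp [pvCommonLen]
    | cons h' t' =>
      simp only [pvCommonLen]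
      split_ifs
      · have := ih t'; simp only [List.length_cons]; omega
      · omega

theorem pvCommonLen_agree (a b : List String) (j : Nat) (hj : j < pvCommonLen a b) :
    a.getD j "" = b.getD j "" := by
  induction a generalizing b j with
  | nil => simp [pvCommonLen] at hj
  | cons h t ih =>
    cases b with
    | nil => simp [pvCommonLen] at hj
    | cons h' t' =>
      simp only [pvCommonLen] at hj
      split_ifs at hj with he
      · cases j with
        | zero => simpa using he
        | succ j => simpa using ih t' j (by omega)
      · omega

theorem pvCommonLen_ne (a b : List String) (h : pvCommonLen a b < min a.length b.length) :
    a.getD (pvCommonLen a b) "" ≠ b.getD (pvCommonLen a b) "" := by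
  induction a generalizing b with
  | nil => simp at h
  | cons hd t ih =>
    cases b with
    | nil => simp at h
    | cons hd' t' =>
      simp only [pvCommonLen] at *
      split_ifs at * with he
      · simpa using ih t' (by simp only [List.length_cons] at h; omega)
      · simpa using he

theorem pvInv_step (seen : List (String × (List (List (String × Int))))) (P : List String) (c : Bool)
    (x : String × (List (List (String × Int)))) (h : pvInv seen P c) :
    pvInv (seen ++ [x]) (pvStep (P, c) x).1 (pvStep (P, c) x).2 := by
  obtain ⟨hagree, hcov, hctrue, hcfalse⟩ := h
  unfold pvStep
  dsimp only
  have hile : pvCommonLen P (pvRev x) ≤ min P.length (pvRev x).length := pvCommonLen_le P (pvRev x)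
  by_cases h1 : pvCommonLen P (pvRev x) < min P.length (pvRev x).length
  · -- disagreement at column i: (P.take (pvCommonLen P (pvRev x)), true)
    rw [if_pos h1]
    dsimp only
    have hilen : (P.take (pvCommonLen P (pvRev x))).length = (pvCommonLen P (pvRev x)) := by
      rw [List.length_take]; omega
    refine ⟨?_, ?_, ?_, ?_⟩
    · intro y hy j hj hjy
      rw [hilen] at hj
      have hgd : (P.take (pvCommonLen P (pvRev x))).getD j "" = P.getD j "" := by
        rw [List.getD_eq_getElem?_getD, List.getD_eq_getElem?_getD, List.getElem?_take_of_lt hj]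
      rw [hgd]
      rcases List.mem_append.1 hy with hy | hy
      · exact hagree y hy j (by omega) hjy
      · simp only [List.mem_singleton] at hy; subst hy
        exact (pvCommonLen_agree P (pvRev y) j (by omega)).symm
    · right; exact ⟨x, List.mem_append_right _ (by simp), by rw [hilen]; omega⟩
    · intro _
      -- witnesses: a seen path covering P (length ≥ P.length > i) and x itself
      have hPne : P ≠ [] := by intro hP; subst hP; simp at h1
      rcases hcov with hP | ⟨y, hy, hylen⟩
      · exact absurd hP hPne
      · refine ⟨y, List.mem_append_left _ hy, x, List.mem_append_right _ (by simp), ?_, ?_, ?_⟩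
        · rw [hilen]; omega
        · rw [hilen]; omega
        · rw [hilen]
          have h2 : (pvRev y).getD (pvCommonLen P (pvRev x)) "" = P.getD (pvCommonLen P (pvRev x)) "" :=
            hagree y hy (pvCommonLen P (pvRev x)) (by omega) (by omega)
          have h3 : P.getD (pvCommonLen P (pvRev x)) "" ≠ (pvRev x).getD (pvCommonLen P (pvRev x)) "" := pvCommonLen_ne P (pvRev x) (by omega)
          rw [h2]; exact h3
    · intro hfalse; simp at hfalse
  · rw [if_neg h1]
    by_cases h2 : pvCommonLen P (pvRev x) = P.length ∧ c = false
    · -- extend: ((pvRev x), false)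
      rw [if_pos h2]
      dsimp only
      obtain ⟨hiP, hc⟩ := h2
      subst hc
      have hcase := hcfalse rfl
      refine ⟨?_, ?_, ?_, ?_⟩
      · intro y hy j hj hjy
        rcases List.mem_append.1 hy with hy | hy
        · have hylen := hcase y hy
          have hjP : j < P.length := by omega
          have := hagree y hy j hjP hjy
          rw [this]
          exact pvCommonLen_agree P (pvRev x) j (by omega)
        · simp only [List.mem_singleton] at hy; subst hy; rfl
      · right; exact ⟨x, List.mem_append_right _ (by simp), le_refl _⟩
      · intro htrue; simp at htrue
      · intro _ y hy
        rcases List.mem_append.1 hy with hy | hy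
        · have := hcase y hy; omega
        · simp only [List.mem_singleton] at hy; subst hy; exact le_refl _
    · -- unchanged: (P, c)
      rw [if_neg h2]
      dsimp only
      refine ⟨?_, ?_, ?_, ?_⟩
      · intro y hy j hj hjy
        rcases List.mem_append.1 hy with hy | hy
        · exact hagree y hy j hj hjy
        · simp only [List.mem_singleton] at hy; subst hy
          exact (pvCommonLen_agree P (pvRev y) j (by omega)).symm
      · rcases hcov with hP | ⟨y, hy, hylen⟩
        · exact Or.inl hP
        · exact Or.inr ⟨y, List.mem_append_left _ hy, hylen⟩
      · intro hc
        obtain ⟨u, hu, v, hv, h3, h4, h5⟩ := hctrue hc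
        exact ⟨u, List.mem_append_left _ hu, v, List.mem_append_left _ hv, h3, h4, h5⟩
      · intro hc
        have hcase := hcfalse hc
        subst hc
        have hiP : (pvCommonLen P (pvRev x)) ≠ P.length := by
          intro h3; exact h2 ⟨h3, rfl⟩
        have hipslt : (pvRev x).length < P.length := by omega
        intro y hy
        rcases List.mem_append.1 hy with hy | hy
        · exact hcase y hy
        · simp only [List.mem_singleton] at hy; subst hy; omega

theorem pvInv_fold (L : List (String × (List (List (String × Int))))) :
    ∀ (seen : List (String × (List (List (String × Int))))) (acc : List String × Bool),
      pvInv seen acc.1 acc.2 → pvInv (seen ++ L) (L.foldl pvStep acc).1 (L.foldl pvStep acc).2 := by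
  induction L with
  | nil => intro seen acc h; simpa using h
  | cons x L ih =>
    intro seen acc h
    have h2 := pvInv_step seen acc.1 acc.2 x h
    have h3 := ih (seen ++ [x]) (pvStep acc x) (by simpa using h2)
    simpa [List.append_assoc] using h3

theorem pvInv_all (paths : List (String × (List (List (String × Int))))) :
    pvInv paths (paths.foldl pvStep ([], false)).1 (paths.foldl pvStep ([], false)).2 := by
  have := pvInv_fold paths [] ([], false) (by
    refine ⟨?_, Or.inl rfl, ?_, ?_⟩ <;> simp)
  simpa using this

-- relating columns of the reversed lists to A's pvLastIps (negative indexing + length filter)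
theorem pv_col_point (l : List (String × Int)) (i : Nat) (h : i < l.length) :
    (((l.map Prod.fst).reverse).getD i "") = ((PySem.List.pyGet? l (-(((i + 1 : Nat)) : Int))).getD ("", 0)).1 := by
  have h1 : PySem.List.pyGet? l (-((i + 1 : Nat) : Int)) = l[l.length - (i + 1)]? :=
    PySem.List.pyGet?_neg_natCast (k := i + 1) (xs := l) (by omega) (by omega)
  rw [h1]
  have hi : i < ((l.map Prod.fst).reverse).length := by simp [h]
  have h2 : l.length - (i + 1) < l.length := by omega
  rw [List.getD_eq_getElem?_getD, List.getElem?_eq_getElem hi,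
      List.getElem?_eq_getElem h2]
  simp only [Option.getD_some, List.getElem_reverse, List.getElem_map, List.length_map]
  congr 2
  omega

@[simp] theorem pv_len_rev (x : String × (List (List (String × Int)))) :
    (pvRev x).length = (pvFirst x).length := by
  simp [pvRev]

theorem pv_col_eq (paths : List (String × (List (List (String × Int))))) (i : Nat) :
    ((paths.map pvRev).filter (fun r => i < r.length)).map (fun r => r.getD i "")
    = (paths.filter (fun x => (i + 1) ≤ (pvFirst x).length)).map
        (fun x => ((PySem.List.pyGet? (pvFirst x) (-(((i + 1 : Nat)) : Int))).getD ("", 0)).1) := by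
  induction paths with
  | nil => rfl
  | cons x xs ih =>
    simp only [List.map_cons, List.filter_cons, pv_len_rev]
    by_cases h : i < (pvFirst x).length
    · have h' : (i + 1) ≤ (pvFirst x).length := h
      simp only [h, h', decide_true, if_pos, List.map_cons, ih]
      rw [pvRev, pv_col_point (pvFirst x) i h]
    · have h' : ¬ (i + 1) ≤ (pvFirst x).length := h
      rw [if_neg (by simpa using h), if_neg (by simpa using h')]
      exact ih

theorem pv_set_eq (paths : List (String × (List (List (String × Int))))) (i : Nat) :
    PySem.Set.ofList (((paths.map pvRev).filter (fun r => i < r.length)).map (fun r => r.getD i ""))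
    = pvLastIps paths (i + 1) := by
  rw [pvLastIps, pv_col_eq]

theorem pv_set_const (l : List String) (v : String) (hne : l ≠ []) (hall : ∀ a ∈ l, a = v) :
    PySem.Set.ofList l = [v] := by
  rcases l with _ | ⟨a, t⟩
  · exact absurd rfl hne
  · have ha : a = v := hall a (by simp)
    subst ha
    rw [PySem.Set.ofList_cons]
    have hd : PySem.Set.discard (PySem.Set.ofList t) a = [] := by
      rw [List.eq_nil_iff_forall_not_mem]
      intro y hy
      rw [PySem.Set.mem_discard] at hy
      exact hy.2 (hall y (by simp [(PySem.Set.mem_ofList _ _).1 hy.1]))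
    rw [hd]

-- column i < |P| is the singleton {P[i]}
theorem pv_col_singleton (paths : List (String × (List (List (String × Int))))) (P : List String) (c : Bool)
    (hinv : pvInv paths P c) (i : Nat) (hi : i < P.length) :
    (pvLastIps paths (i + 1)).length = 1 := by
  obtain ⟨hagree, hcov, _, _⟩ := hinv
  rw [← pv_set_eq]
  have hPne : P ≠ [] := by intro h; subst h; simp at hi
  rcases hcov with h | ⟨y, hy, hylen⟩
  · exact absurd h hPne
  · have hconst : PySem.Set.ofList (((paths.map pvRev).filter (fun r => i < r.length)).map (fun r => r.getD i ""))
        = [P.getD i ""] := by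
      apply pv_set_const
      · intro hemp
        have hmem : pvRev y ∈ (paths.map pvRev).filter (fun r => i < r.length) := by
          rw [List.mem_filter]
          exact ⟨List.mem_map_of_mem hy, by simp only [decide_eq_true_eq]; omega⟩
        have : (pvRev y).getD i "" ∈ (((paths.map pvRev).filter (fun r => i < r.length)).map (fun r => r.getD i "")) :=
          List.mem_map_of_mem hmem
        rw [hemp] at this
        simp at this
      · intro a ha
        rw [List.mem_map] at ha
        obtain ⟨r, hr, hra⟩ := ha
        rw [List.mem_filter] at hr
        obtain ⟨hr1, hr2⟩ := hr
        rw [List.mem_map] at hr1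
        obtain ⟨z, hz, hzr⟩ := hr1
        subst hzr
        rw [← hra]
        exact hagree z hz i hi (by simpa using hr2)
    rw [hconst]
    rfl

-- column |P| is not a singleton
theorem pv_col_break (paths : List (String × (List (List (String × Int))))) (P : List String) (c : Bool)
    (hinv : pvInv paths P c) :
    (pvLastIps paths (P.length + 1)).length ≠ 1 := by
  obtain ⟨hagree, hcov, hctrue, hcfalse⟩ := hinv
  rw [← pv_set_eq]
  cases c with
  | false =>
    have hcase := hcfalse rfl
    have hfil : (paths.map pvRev).filter (fun r => P.length < r.length) = [] := by
      rw [List.filter_eq_nil_iff]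
      intro r hr
      rw [List.mem_map] at hr
      obtain ⟨z, hz, hzr⟩ := hr
      subst hzr
      have := hcase z hz
      simp only [decide_eq_true_eq]
      omega
    rw [hfil]
    simp [PySem.Set.ofList]
  | true =>
    obtain ⟨u, hu, v, hv, h1, h2, h3⟩ := hctrue rfl
    set L := (((paths.map pvRev).filter (fun r => P.length < r.length)).map (fun r => r.getD P.length ""))
    have hmemu : (pvRev u).getD P.length "" ∈ L := by
      apply List.mem_map_of_mem
      rw [List.mem_filter]
      exact ⟨List.mem_map_of_mem hu, by simp only [decide_eq_true_eq]; omega⟩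
    have hmemv : (pvRev v).getD P.length "" ∈ L := by
      apply List.mem_map_of_mem
      rw [List.mem_filter]
      exact ⟨List.mem_map_of_mem hv, by simp only [decide_eq_true_eq]; omega⟩
    intro hlen
    have hsu : (pvRev u).getD P.length "" ∈ PySem.Set.ofList L := by
      rw [PySem.Set.mem_ofList]; exact hmemu
    have hsv : (pvRev v).getD P.length "" ∈ PySem.Set.ofList L := by
      rw [PySem.Set.mem_ofList]; exact hmemv
    rcases hsl : PySem.Set.ofList L with _ | ⟨a, t⟩
    · rw [hsl] at hsu; simp at hsu
    · rw [hsl] at hlen hsu hsv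
      have ht : t = [] := by simpa using hlen
      subst ht
      simp only [List.mem_singleton] at hsu hsv
      exact h3 (hsu.trans hsv.symm)

theorem pv_foldl_max_mono (paths : List (String × (List (List (String × Int))))) :
    ∀ acc : Nat, acc ≤ paths.foldl (fun m x => max m (pvFirst x).length) acc := by
  induction paths with
  | nil => intro acc; simp
  | cons x xs ih =>
    intro acc
    simp only [List.foldl_cons]
    exact le_trans (le_max_left _ _) (ih _)

theorem pv_len_le_max (paths : List (String × (List (List (String × Int))))) :
    ∀ x ∈ paths, ∀ acc : Nat,
      (pvFirst x).length ≤ paths.foldl (fun m y => max m (pvFirst y).length) acc := by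
  induction paths with
  | nil => intro x hx; cases hx
  | cons y ys ih =>
    intro x hx acc
    rw [List.mem_cons] at hx
    rcases hx with hx | hx
    · subst hx
      simp only [List.foldl_cons]
      exact le_trans (le_max_right _ _) (pv_foldl_max_mono ys _)
    · exact ih x hx _

-- A's loop returns m+1 when columns 0..m-1 are singletons and column m is not
theorem pvALoop_run (paths : List (String × (List (List (String × Int))))) (m : Nat)
    (hcols : ∀ j < m, (pvLastIps paths (j + 1)).length = 1)
    (hm : (pvLastIps paths (m + 1)).length ≠ 1) :
    ∀ (fuel i : Nat), i ≤ m → m + 1 - i ≤ fuel → pvALoop paths (i + 1) fuel = (m : Int) + 1 := by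
  intro fuel
  induction fuel with
  | zero => intro i h1 h2; omega
  | succ f ih =>
    intro i h1 h2
    rw [pvALoop]
    by_cases hi : i < m
    · rw [if_pos (hcols i hi)]
      exact ih (i + 1) (by omega) (by omega)
    · have him : i = m := by omega
      subst him
      rw [if_neg hm]
      push_cast; ring

-- ===== VERDICT (by name: the statement is the Claim_ definition above) =====
theorem index_subpaths_biggest_common_suffix_spec : Claim_equal_index_subpaths_biggest_common_suffix := by
  intro paths _ _
  unfold Spec_index_subpaths_biggest_common_suffix
  unfold index_subpaths_biggest_common_suffix index_subpaths_biggest_common_suffix_alt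
  have hinv := pvInv_all paths
  set P := (paths.foldl pvStep ([], false)).1 with hP
  set c := (paths.foldl pvStep ([], false)).2 with hc
  have hcols : ∀ j < P.length, (pvLastIps paths (j + 1)).length = 1 :=
    fun j hj => pv_col_singleton paths P c hinv j hj
  have hbreak := pv_col_break paths P c hinv
  have hle : P.length ≤ paths.foldl (fun m x => max m (pvFirst x).length) 0 := by
    obtain ⟨_, hcov, _, _⟩ := hinv
    rcases hcov with h | ⟨y, hy, hylen⟩
    · rw [h]; simp
    · calc P.length ≤ (pvRev y).length := hylen
        _ = (pvFirst y).length := pv_len_rev y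
        _ ≤ _ := pv_len_le_max paths y hy 0
  have := pvALoop_run paths P.length hcols hbreak
    (paths.foldl (fun m x => max m (pvFirst x).length) 0 + 1) 0 (by omega) (by omega)
  simpa using this
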